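-- pv_equiv track=rewrite | github.com/Enjef/Algo | 2200 - 2299/2295 - Replace Elements in an Array/2295 - Replace Elements in an Array.py | arrayChange_best_memory
-- ===== SOURCE A (Python) =====
-- from typing import List
--
-- def arrayChange_best_memory(nums: List[int], operations: List[List[int]]) -> List[int]:
--     hashmap = {}
--     while operations:
--         cad = operations.pop()
--         if cad[1] in hashmap:
--             hashmap[cad[0]] = hashmap[cad[1]]
--         else:
--             hashmap[cad[0]] = cad[1]
--     for i in range(len(nums)):
--         cad = nums[i]
--         if cad in hashmap:
--             nums[i] = hashmap[cad]
--     return nums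
-- ===== SOURCE B (Python) =====
-- from typing import List
--
-- def arrayChange_best_memory(nums: List[int], operations: List[List[int]]) -> List[int]:
--     for op in operations:
--         a, b = op[0], op[1]
--         for i, x in enumerate(nums):
--             if x == a:
--                 nums[i] = b
--     return nums
-- ===== Notes on version B (the rewrite author's own statement) =====
-- stated objective: simpler
-- what changed: Drops the reverse-order chained hashmap entirely: B walks the operations forward and, for each [a, b], rewrites every element equal to a to b directly in nums.
import Mathlib
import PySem

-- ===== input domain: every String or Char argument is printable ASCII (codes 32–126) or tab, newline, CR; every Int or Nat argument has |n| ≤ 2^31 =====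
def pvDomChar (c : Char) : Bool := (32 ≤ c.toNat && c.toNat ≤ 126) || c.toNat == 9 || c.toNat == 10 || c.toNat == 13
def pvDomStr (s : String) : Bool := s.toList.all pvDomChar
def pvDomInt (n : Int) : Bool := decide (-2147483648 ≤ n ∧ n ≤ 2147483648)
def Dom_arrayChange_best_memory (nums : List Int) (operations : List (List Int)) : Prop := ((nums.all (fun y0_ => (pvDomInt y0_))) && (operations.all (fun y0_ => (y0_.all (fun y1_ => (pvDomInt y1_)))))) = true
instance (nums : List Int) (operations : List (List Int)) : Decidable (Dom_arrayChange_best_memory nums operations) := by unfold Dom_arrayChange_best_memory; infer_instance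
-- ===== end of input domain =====

-- B replaces A's reverse-order chained hashmap by a plain forward sweep that rewrites
-- matching values in nums per operation (simpler, value-based). Return-value equivalence
-- only: both Pythons mutate nums in place, and A additionally empties `operations`.

-- ===== PORT A =====
-- while operations: cad = operations.pop()  → structural recursion over operations.reverse
-- (pop takes the LAST element first). cad[0]/cad[1] via pyGet?; a short op raises
-- IndexError in Python (excluded by Pre_), here the guard stops the loop.
def pvLoopA : List (List Int) → PySem.Dict Int Int → PySem.Dict Int Int
  | [], m => m
  | cad :: rest, m =>
      match PySem.List.pyGet? cad 0, PySem.List.pyGet? cad 1 with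
      | some a, some b =>
          match PySem.Dict.get? m b with
          | some w => pvLoopA rest (PySem.Dict.insert m a w)   -- cad[1] in hashmap
          | none   => pvLoopA rest (PySem.Dict.insert m a b)
      | _, _ => m   -- Python: IndexError (outside Pre_)

def arrayChange_best_memory (nums : List Int) (operations : List (List Int)) : List Int :=
  let hashmap := pvLoopA operations.reverse PySem.Dict.empty
  -- for i in range(len(nums)): nums[i] = hashmap[nums[i]] if present
  nums.map (fun cad => match PySem.Dict.get? hashmap cad with
                       | some v => v
                       | none => cad)

-- ===== PORT B =====
-- for op in operations: a, b = op[0], op[1]; for i, x in enumerate(nums): if x == a: nums[i] = b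
def pvLoopB : List (List Int) → List Int → List Int
  | [], nums => nums
  | op :: rest, nums =>
      match PySem.List.pyGet? op 0, PySem.List.pyGet? op 1 with
      | some a, some b => pvLoopB rest (nums.map (fun x => if x = a then b else x))
      | _, _ => nums   -- Python: IndexError (outside Pre_)

def arrayChange_best_memory_alt (nums : List Int) (operations : List (List Int)) : List Int :=
  pvLoopB operations nums

-- ===== PRECONDITION & SPEC =====
-- Pre_ excludes exactly the inputs where Python A raises IndexError: an operation with
-- fewer than two entries (cad[0]/cad[1]).  B raises there too.
def Pre_arrayChange_best_memory (nums : List Int) (operations : List (List Int)) : Prop :=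
  ∀ op ∈ operations, 2 ≤ op.length
instance (nums : List Int) (operations : List (List Int)) : Decidable (Pre_arrayChange_best_memory nums operations) := by unfold Pre_arrayChange_best_memory; infer_instance
def pvWitness_arrayChange_best_memory : List Int × List (List Int) := ([1, 2, 1, 3], [[1, 5], [5, 7]])

def Spec_arrayChange_best_memory (nums : List Int) (operations : List (List Int)) (out : List Int) : Prop := out = arrayChange_best_memory_alt nums operations
instance (nums : List Int) (operations : List (List Int)) (out : List Int) : Decidable (Spec_arrayChange_best_memory nums operations out) := by unfold Spec_arrayChange_best_memory; infer_instance

-- ===== CLAIM (what is proved, stated in full; the proofs are below) =====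
def Claim_equal_arrayChange_best_memory : Prop := ∀ (nums : List Int) (operations : List (List Int)), Dom_arrayChange_best_memory nums operations → Pre_arrayChange_best_memory nums operations → Spec_arrayChange_best_memory nums operations (arrayChange_best_memory nums operations)

-- ===== LEMMAS AND PROOFS =====

lemma pvGet0 (a : Int) (t : List Int) : PySem.List.pyGet? (a :: t) 0 = some a :=
  PySem.List.pyGet?_zero_cons a t

lemma pvGet1 (a b : Int) (t : List Int) : PySem.List.pyGet? (a :: b :: t) 1 = some b := by
  simp [PySem.List.pyGet?, PySem.List.pyIdx?]

-- Forward sequential application of the operations to a single value, with a final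
-- continuation g (used to absorb an arbitrary starting dict on the A side).
def pvSeq (g : Int → Int) : List (List Int) → Int → Int
  | [], x => g x
  | op :: rest, x =>
      match PySem.List.pyGet? op 0, PySem.List.pyGet? op 1 with
      | some a, some b => if x = a then pvSeq g rest b else pvSeq g rest x
      | _, _ => x

def pvF (m : PySem.Dict Int Int) (x : Int) : Int :=
  match PySem.Dict.get? m x with
  | some v => v
  | none => x

lemma pvLoopA_append (L1 L2 : List (List Int)) (m : PySem.Dict Int Int)
    (h : ∀ op ∈ L1, 2 ≤ op.length) :
    pvLoopA (L1 ++ L2) m = pvLoopA L2 (pvLoopA L1 m) := by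
  induction L1 generalizing m with
  | nil => simp [pvLoopA]
  | cons op rest ih =>
    have hop : 2 ≤ op.length := h op (by simp)
    obtain ⟨a, b, t, rfl⟩ : ∃ a b t, op = a :: b :: t := by
      match op, hop with
      | a :: b :: t, _ => exact ⟨a, b, t, rfl⟩
    have hrest : ∀ o ∈ rest, 2 ≤ o.length := fun o ho => h o (by simp [ho])
    simp only [List.cons_append, pvLoopA, pvGet0, pvGet1]
    cases PySem.Dict.get? m b <;> exact ih _ hrest

-- key lemma on the A side: looking up through the dict built in reverse order equals
-- forward sequential application with continuation pvF m.
lemma pvLoopA_eq_seq (ops : List (List Int)) (m : PySem.Dict Int Int)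
    (h : ∀ op ∈ ops, 2 ≤ op.length) (x : Int) :
    pvF (pvLoopA ops.reverse m) x = pvSeq (pvF m) ops x := by
  induction ops generalizing x with
  | nil => simp [pvLoopA, pvSeq]
  | cons op rest ih =>
    have hop : 2 ≤ op.length := h op (by simp)
    obtain ⟨a, b, t, rfl⟩ : ∃ a b t, op = a :: b :: t := by
      match op, hop with
      | o1 :: o2 :: ot, _ => exact ⟨o1, o2, ot, rfl⟩
    have hrest : ∀ o ∈ rest, 2 ≤ o.length := fun o ho => h o (by simp [ho])
    have hrev : (((a :: b :: t) :: rest).reverse) = rest.reverse ++ [a :: b :: t] := by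
      simp
    rw [hrev, pvLoopA_append _ _ _ (by intro o ho; exact hrest o (List.mem_reverse.mp ho))]
    set M := pvLoopA rest.reverse m with hM
    have hstep : pvLoopA [a :: b :: t] M = PySem.Dict.insert M a (pvF M b) := by
      simp only [pvLoopA, pvGet0, pvGet1, pvF]
      cases PySem.Dict.get? M b <;> rfl
    rw [hstep]
    have hins : ∀ y, pvF (PySem.Dict.insert M a (pvF M b)) y =
        if y = a then pvF M b else pvF M y := by
      intro y
      simp only [pvF, PySem.Dict.get?_insert]
      split_ifs <;> rfl
    simp only [pvSeq, pvGet0, pvGet1, hins]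
    split_ifs with hx
    · exact congrArg (fun z => z) (ih hrest b) ▸ ih hrest b
    · exact ih hrest x

-- B side: the nested replacement loop is pointwise forward sequential application.
lemma pvLoopB_eq_map (ops : List (List Int)) (nums : List Int) :
    pvLoopB ops nums = nums.map (pvSeq id ops) := by
  induction ops generalizing nums with
  | nil => simp [pvLoopB, pvSeq]
  | cons op rest ih =>
    cases op with
    | nil => simp [pvLoopB, pvSeq, PySem.List.pyGet?]
    | cons a t =>
      cases t with
      | nil =>
        have h1 : PySem.List.pyGet? [a] 1 = none := by
          rw [PySem.List.pyGet?_eq_none_iff]; simp [PySem.Raise.InRange]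
        simp [pvLoopB, pvSeq, h1]
      | cons b t' =>
        simp only [pvLoopB, pvSeq, pvGet0, pvGet1]
        rw [ih, List.map_map]
        apply List.map_congr_left
        intro x _
        simp only [Function.comp]
        split_ifs <;> rfl

lemma pvSeq_congr (g g' : Int → Int) (hg : ∀ x, g x = g' x) (ops : List (List Int)) (x : Int) :
    pvSeq g ops x = pvSeq g' ops x := by
  induction ops generalizing x with
  | nil => exact hg x
  | cons op rest ih =>
    simp only [pvSeq]
    cases PySem.List.pyGet? op 0 <;> cases PySem.List.pyGet? op 1 <;> simp <;> split_ifs <;> apply ih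

-- ===== VERDICT (by name: the statement is the Claim_ definition above) =====
theorem arrayChange_best_memory_spec : Claim_equal_arrayChange_best_memory := by
  intro nums operations _hDom hPre
  unfold Spec_arrayChange_best_memory arrayChange_best_memory arrayChange_best_memory_alt
  rw [pvLoopB_eq_map]
  apply List.map_congr_left
  intro x _
  have h1 := pvLoopA_eq_seq operations PySem.Dict.empty hPre x
  have h2 : ∀ y, pvF PySem.Dict.empty y = id y := by
    intro y; simp [pvF, PySem.Dict.get?_empty]
  calc (match PySem.Dict.get? (pvLoopA operations.reverse PySem.Dict.empty) x with
        | some v => v | none => x)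
      = pvF (pvLoopA operations.reverse PySem.Dict.empty) x := rfl
    _ = pvSeq (pvF PySem.Dict.empty) operations x := h1
    _ = pvSeq id operations x := pvSeq_congr _ _ h2 operations x
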